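-- pv_equiv track=rewrite | github.com/aknijn/phantastic-galaxy | PHANtC-Tree/Scripts/mlst_distance.py | mlst_distance
-- ===== SOURCE A (Python) =====
-- def compare_alleles(allele_1, allele_2):
--   # compare alleles, return 1 if different, 0 if equal or not to be compared
--   if allele_1 == allele_2:
--     comparison = 0
--   elif allele_1 == '0' or allele_2 == '0':
--     # allele not found
--     comparison = 0
--   else:
--     comparison = 1
--   return comparison
--
-- def mlst_distance(mlst):
--   # a profile file was given, substitute the allele numbers with the allele sequence hashes
--   rows = len(mlst)
--   cols = len(mlst[0])
--   D = [ [0]*(rows) for _ in range(rows) ]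
--   h = []
--   for row in range(0, rows):
--     h.append(mlst[row][0])
--     for row2 in range(row+1, rows):
--       dist = 0
--       for col in range(1, cols):
--         dist = dist + compare_alleles(mlst[row][col], mlst[row2][col])
--       D[row][row2] = dist
--       D[row2][row] = dist
--   return D, h
-- ===== SOURCE B (Python) =====
-- def mlst_distance(mlst):
--   # Column-indexed bucketing: per column, bucket row indices by allele value in a dict,
--   # then add +1 between every pair of distinct non-'0' buckets (cross-bucket pairs).
--   # No allele pair is ever compared: equal/'0' pairs simply never cross buckets.
--   rows = len(mlst)
--   cols = len(mlst[0])
--   h = [row[0] for row in mlst]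
--   D = [[0] * rows for _ in range(rows)]
--   for col in range(1, cols):
--     groups = {}
--     for i in range(rows):
--       groups.setdefault(mlst[i][col], []).append(i)
--     members = [g for v, g in groups.items() if v != '0']
--     for a in range(len(members)):
--       for b in range(a + 1, len(members)):
--         for i in members[a]:
--           for j in members[b]:
--             D[i][j] += 1
--             D[j][i] += 1
--   return D, h
-- ===== Notes on version B (the rewrite author's own statement) =====
-- stated objective: alternative
-- what changed: Replaces A's row-pair inner loop of element-by-element allele comparisons by a per-column inverted index: each column's row indices are bucketed by allele value in a dict, and +1 is added between every pair of distinct non-'0' buckets, so no allele pair is ever compared and the distance matrix is accumulated incrementally across column passes.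
import Mathlib
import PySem

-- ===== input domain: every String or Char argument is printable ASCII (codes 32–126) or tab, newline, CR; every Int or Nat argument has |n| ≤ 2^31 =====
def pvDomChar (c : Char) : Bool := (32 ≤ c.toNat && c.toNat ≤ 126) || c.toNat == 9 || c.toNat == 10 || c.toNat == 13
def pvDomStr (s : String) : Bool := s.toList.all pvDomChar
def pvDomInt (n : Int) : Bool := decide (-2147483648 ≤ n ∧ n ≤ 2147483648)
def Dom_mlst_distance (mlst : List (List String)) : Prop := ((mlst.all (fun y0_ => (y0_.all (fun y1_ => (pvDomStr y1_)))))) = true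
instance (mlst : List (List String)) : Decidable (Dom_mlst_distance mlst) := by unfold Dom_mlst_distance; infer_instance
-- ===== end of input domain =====

-- B replaces A's pairwise allele comparisons by per-column bucketing of row indices by
-- allele value, adding +1 only between distinct non-'0' buckets; return-value equivalence.

-- ===== PORT A =====
def compareAlleles (a1 a2 : String) : Int :=
  if a1 == a2 then 0
  else if a1 == "0" || a2 == "0" then 0
  else 1

def mlst_distance (mlst : List (List String)) : List (List Int) × List String :=
  let rows : Int := mlst.length
  let cols : Int := (PySem.List.pyGetD mlst 0 []).length
  let D : List (List Int) := (PySem.List.pyRange 0 rows 1).map (fun _ => List.replicate mlst.length (0 : Int))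
  let st := (PySem.List.pyRange 0 rows 1).foldl (fun (st : List (List Int) × List String) row =>
    let D := st.1
    let h := st.2 ++ [PySem.List.pyGetD (PySem.List.pyGetD mlst row []) 0 ""]
    let D := (PySem.List.pyRange (row+1) rows 1).foldl (fun D row2 =>
      let dist := (PySem.List.pyRange 1 cols 1).foldl (fun dist col =>
        dist + compareAlleles (PySem.List.pyGetD (PySem.List.pyGetD mlst row []) col "")
                              (PySem.List.pyGetD (PySem.List.pyGetD mlst row2 []) col "")) 0
      let D := PySem.List.pySetD D row (PySem.List.pySetD (PySem.List.pyGetD D row []) row2 dist)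
      PySem.List.pySetD D row2 (PySem.List.pySetD (PySem.List.pyGetD D row2 []) row dist)) D
    (D, h)) (D, ([] : List String))
  st

-- ===== PORT B =====
-- 'groups.setdefault(v, []).append(i)' sets groups[v] = groups.get(v, []) + [i] in place,
-- which is exactly Dict.modify v [] (· ++ [i]); 'row[0]' is pyGetD row 0 "" (exact on
-- Pre_, where every row is non-empty).
def mlst_distance_alt (mlst : List (List String)) : List (List Int) × List String :=
  let rows : Int := mlst.length
  let cols : Int := (PySem.List.pyGetD mlst 0 []).length
  let h := mlst.map (fun row => PySem.List.pyGetD row 0 "")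
  let D0 : List (List Int) := (PySem.List.pyRange 0 rows 1).map (fun _ => List.replicate mlst.length (0 : Int))
  let D := (PySem.List.pyRange 1 cols 1).foldl (fun D col =>
    let groups : PySem.Dict String (List Int) := (PySem.List.pyRange 0 rows 1).foldl
      (fun g i => g.modify (PySem.List.pyGetD (PySem.List.pyGetD mlst i []) col "") [] (fun xs => xs ++ [i]))
      PySem.Dict.empty
    let members : List (List Int) := (groups.items.filter (fun p => p.1 ≠ "0")).map (fun p => p.2)
    (PySem.List.pyRange 0 (members.length : Int) 1).foldl (fun D a =>
      (PySem.List.pyRange (a + 1) (members.length : Int) 1).foldl (fun D b =>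
        (PySem.List.pyGetD members a []).foldl (fun D i =>
          (PySem.List.pyGetD members b []).foldl (fun D j =>
            let D := PySem.List.pySetD D i (PySem.List.pySetD (PySem.List.pyGetD D i []) j
              (PySem.List.pyGetD (PySem.List.pyGetD D i []) j 0 + 1))
            PySem.List.pySetD D j (PySem.List.pySetD (PySem.List.pyGetD D j []) i
              (PySem.List.pyGetD (PySem.List.pyGetD D j []) i 0 + 1))) D) D) D) D) D0
  (D, h)

-- ===== PRECONDITION & SPEC =====
-- Pre_ excludes exactly the inputs where Python A raises IndexError: the empty profile list,
-- a first row with no columns, and ragged inputs where some row is shorter than the first row.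
def Pre_mlst_distance (mlst : List (List String)) : Prop :=
  mlst ≠ [] ∧ 1 ≤ (mlst.getD 0 []).length ∧ ∀ r ∈ mlst, (mlst.getD 0 []).length ≤ r.length
instance (mlst : List (List String)) : Decidable (Pre_mlst_distance mlst) := by unfold Pre_mlst_distance; infer_instance

def pvWitness_mlst_distance : List (List String) := [["s1", "1", "2"], ["s2", "1", "3"]]

def Spec_mlst_distance (mlst : List (List String)) (out : List (List Int) × List String) : Prop := out = mlst_distance_alt mlst
instance (mlst : List (List String)) (out : List (List Int) × List String) : Decidable (Spec_mlst_distance mlst out) := by unfold Spec_mlst_distance; infer_instance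

-- ===== CLAIM (what is proved, stated in full; the proofs are below) =====
def Claim_equal_mlst_distance : Prop := ∀ (mlst : List (List String)), Dom_mlst_distance mlst → Pre_mlst_distance mlst → Spec_mlst_distance mlst (mlst_distance mlst)

-- ===== LEMMAS AND PROOFS =====

-- shared cell model
def pvDist (mlst : List (List String)) (i j : Nat) : Int :=
  ((List.range ((mlst.getD 0 []).length - 1)).map (fun t =>
    compareAlleles ((mlst.getD i []).getD (1+t) "") ((mlst.getD j []).getD (1+t) ""))).sum

def pvCell (D : List (List Int)) (i j : Nat) : Int := (D.getD i []).getD j 0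

def updCell (D : List (List Int)) (i j : Nat) (v : Int) : List (List Int) :=
  D.set i ((D.getD i []).set j v)

def innerF (mlst : List (List String)) (k : Nat) (D : List (List Int)) (j : Nat) : List (List Int) :=
  updCell (updCell D k j (pvDist mlst k j)) j k (pvDist mlst k j)

lemma compareAlleles_eq (a b : String) :
    compareAlleles a b = if a ≠ b ∧ a ≠ "0" ∧ b ≠ "0" then 1 else 0 := by
  simp only [compareAlleles, beq_iff_eq, Bool.or_eq_true]
  split_ifs <;> tauto

lemma compareAlleles_self (a : String) : compareAlleles a a = 0 := by
  simp [compareAlleles_eq]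

lemma compareAlleles_comm (a b : String) : compareAlleles a b = compareAlleles b a := by
  simp only [compareAlleles_eq]; split_ifs <;> tauto

lemma pvDist_self (mlst : List (List String)) (i : Nat) : pvDist mlst i i = 0 := by
  simp [pvDist, compareAlleles_self]

lemma pvDist_symm (mlst : List (List String)) (i j : Nat) : pvDist mlst i j = pvDist mlst j i := by
  unfold pvDist
  congr 1
  exact List.map_congr_left (fun t _ => compareAlleles_comm _ _)

lemma dist_eq (mlst : List (List String)) (k j : Nat) :
    (PySem.List.pyRange 1 ((PySem.List.pyGetD mlst 0 []).length : Int) 1).foldl (fun dist col =>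
      dist + compareAlleles (PySem.List.pyGetD (PySem.List.pyGetD mlst (k : Int) []) col "")
                            (PySem.List.pyGetD (PySem.List.pyGetD mlst (j : Int) []) col "")) 0
    = pvDist mlst k j := by
  have harg : ((((mlst.getD 0 []).length : Int)) - 1).toNat = (mlst.getD 0 []).length - 1 := by
    omega
  simp only [PySem.List.pyGetD_zero, PySem.List.pyRange_one, List.foldl_map,
    PySem.List.foldl_add, zero_add, harg]
  unfold pvDist
  congr 1
  apply List.map_congr_left
  intro t _
  have e1 : ∀ (r : List String), PySem.List.pyGetD r ((1:Int) + (t:Int)) "" = r.getD (1+t) "" := by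
    intro r
    rw [PySem.List.pyGetD_of_nonneg _ _ (by positivity),
        show ((1:Int) + (t:Int)).toNat = 1 + t from by omega]
  simp only [PySem.List.pyGetD_natCast, e1]

lemma cell_upd (n : Nat) (D : List (List Int)) (hlen : D.length = n) (hrows : ∀ r ∈ D, r.length = n)
    (i j : Nat) (hi : i < n) (hj : j < n) (v : Int) (i' j' : Nat) :
    pvCell (updCell D i j v) i' j' = if i' = i ∧ j' = j then v else pvCell D i' j' := by
  have hiD : i < D.length := by omega
  have hrow : D.getD i [] ∈ D := by
    rw [List.getD_eq_getElem _ _ hiD]; exact List.getElem_mem _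
  have hjlen : j < (D.getD i []).length := by rw [hrows _ hrow]; omega
  have hjlen' : j < (D[i]?.getD []).length := by
    simpa only [List.getD_eq_getElem?_getD] using hjlen
  by_cases h1 : i' = i
  · subst h1
    have e1 : (updCell D i' j v).getD i' [] = (D.getD i' []).set j v := by
      simp [updCell, List.getD_eq_getElem?_getD, hiD]
    rw [show pvCell (updCell D i' j v) i' j' = ((D.getD i' []).set j v).getD j' 0 from by
      rw [pvCell, e1]]
    by_cases h2 : j' = j
    · subst h2
      simp [List.getD_eq_getElem?_getD, hjlen']
    · have hr : ¬ (i' = i' ∧ j' = j) := fun h => h2 h.2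
      rw [if_neg hr]
      simp only [List.getD_eq_getElem?_getD, List.getElem?_set, pvCell]
      rw [if_neg (fun h : j = j' => h2 h.symm)]
  · have e0 : (updCell D i j v).getD i' [] = D.getD i' [] := by
      simp only [updCell, List.getD_eq_getElem?_getD, List.getElem?_set]
      rw [if_neg (fun h : i = i' => h1 h.symm)]
    rw [show pvCell (updCell D i j v) i' j' = (D.getD i' []).getD j' 0 from by rw [pvCell, e0]]
    rw [if_neg (fun h : i' = i ∧ j' = j => h1 h.1)]
    rfl

lemma updCell_len (n : Nat) (D : List (List Int)) (hlen : D.length = n) (hrows : ∀ r ∈ D, r.length = n)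
    (i j : Nat) (hi : i < n) (v : Int) :
    (updCell D i j v).length = n ∧ ∀ r ∈ updCell D i j v, r.length = n := by
  have hiD : i < D.length := by omega
  have hrow : D.getD i [] ∈ D := by
    rw [List.getD_eq_getElem _ _ hiD]; exact List.getElem_mem _
  refine ⟨by simp [updCell, hlen], ?_⟩
  intro r hr
  rcases List.mem_or_eq_of_mem_set hr with h | h
  · exact hrows _ h
  · subst h
    rw [List.length_set]
    exact hrows _ hrow

lemma inner_fold_inv (mlst : List (List String)) (k : Nat) (hk : k < mlst.length)
    (m : Nat) (hm : k+1+m ≤ mlst.length) (D : List (List Int))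
    (hlen : D.length = mlst.length) (hrows : ∀ r ∈ D, r.length = mlst.length)
    (hcell : ∀ i j, i < mlst.length → j < mlst.length →
      pvCell D i j = if i ≠ j ∧ min i j < k then pvDist mlst i j else 0) :
    ((List.range m).foldl (fun D t => innerF mlst k D (k+1+t)) D).length = mlst.length ∧
    (∀ r ∈ (List.range m).foldl (fun D t => innerF mlst k D (k+1+t)) D, r.length = mlst.length) ∧
    ∀ i j, i < mlst.length → j < mlst.length →
      pvCell ((List.range m).foldl (fun D t => innerF mlst k D (k+1+t)) D) i j =
        if i ≠ j ∧ (min i j < k ∨ (min i j = k ∧ max i j < k+1+m)) then pvDist mlst i j else 0 := by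
  induction m with
  | zero =>
    refine ⟨by simpa using hlen, by simpa using hrows, ?_⟩
    intro i j hi hj
    simp only [List.range_zero, List.foldl_nil]
    rw [hcell i j hi hj]
    by_cases h : i ≠ j ∧ min i j < k
    · rw [if_pos h, if_pos ⟨h.1, Or.inl h.2⟩]
    · rw [if_neg h, if_neg (by omega)]
  | succ m ih =>
    obtain ⟨el, er, ec⟩ := ih (by omega)
    rw [List.range_succ, List.foldl_append, List.foldl_cons, List.foldl_nil]
    set E := (List.range m).foldl (fun D t => innerF mlst k D (k+1+t)) D with hE
    have hjn : k+1+m < mlst.length := by omega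
    obtain ⟨l1, r1⟩ := updCell_len mlst.length E el er k (k+1+m) (by omega)
      (pvDist mlst k (k+1+m))
    obtain ⟨l2, r2⟩ := updCell_len mlst.length _ l1 r1 (k+1+m) k hjn (pvDist mlst k (k+1+m))
    refine ⟨by simpa [innerF] using l2, by simpa [innerF] using r2, ?_⟩
    intro i j hi hj
    rw [show innerF mlst k E (k+1+m) =
      updCell (updCell E k (k+1+m) (pvDist mlst k (k+1+m))) (k+1+m) k (pvDist mlst k (k+1+m))
      from rfl]
    rw [cell_upd mlst.length _ l1 r1 (k+1+m) k hjn (by omega) _ i j]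
    rw [cell_upd mlst.length E el er k (k+1+m) (by omega) hjn _ i j]
    rw [ec i j hi hj]
    by_cases c1 : i = k+1+m ∧ j = k
    · obtain ⟨e1, e2⟩ := c1
      subst e1; subst e2
      rw [if_pos ⟨rfl, rfl⟩, if_pos (by omega)]
      exact pvDist_symm _ _ _
    · rw [if_neg c1]
      by_cases c2 : i = k ∧ j = k+1+m
      · obtain ⟨e1, e2⟩ := c2
        subst e1; subst e2
        rw [if_pos ⟨rfl, rfl⟩, if_pos (by omega)]
      · rw [if_neg c2]
        by_cases c3 : i ≠ j ∧ (min i j < k ∨ (min i j = k ∧ max i j < k+1+m))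
        · rw [if_pos c3, if_pos (by omega)]
        · rw [if_neg c3, if_neg (by omega)]

lemma outer_fold_inv (mlst : List (List String)) (k : Nat) (hk : k ≤ mlst.length) :
    ((List.range k).foldl (fun D r =>
        (List.range (mlst.length - (r+1))).foldl (fun D t => innerF mlst r D (r+1+t)) D)
      ((List.range mlst.length).map (fun _ => List.replicate mlst.length (0 : Int)))).length = mlst.length ∧
    (∀ r ∈ (List.range k).foldl (fun D r =>
        (List.range (mlst.length - (r+1))).foldl (fun D t => innerF mlst r D (r+1+t)) D)
      ((List.range mlst.length).map (fun _ => List.replicate mlst.length (0 : Int))), r.length = mlst.length) ∧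
    ∀ i j, i < mlst.length → j < mlst.length →
      pvCell ((List.range k).foldl (fun D r =>
        (List.range (mlst.length - (r+1))).foldl (fun D t => innerF mlst r D (r+1+t)) D)
      ((List.range mlst.length).map (fun _ => List.replicate mlst.length (0 : Int)))) i j =
        if i ≠ j ∧ min i j < k then pvDist mlst i j else 0 := by
  induction k with
  | zero =>
    refine ⟨by simp, ?_, ?_⟩
    · intro r hr
      simp only [List.range_zero, List.foldl_nil] at hr
      obtain ⟨_, _, rfl⟩ := List.mem_map.mp hr
      simp
    · intro i j hi hj
      simp only [List.range_zero, List.foldl_nil]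
      rw [if_neg (by omega)]
      have : ((List.range mlst.length).map (fun _ => List.replicate mlst.length (0 : Int))).getD i []
          = List.replicate mlst.length (0 : Int) := by
        rw [List.getD_eq_getElem?_getD]
        rw [List.getElem?_eq_getElem (by simpa using hi)]
        simp
      rw [pvCell, this]
      rw [List.getD_eq_getElem?_getD, List.getElem?_eq_getElem (by simpa using hj)]
      simp
  | succ k ih =>
    obtain ⟨el, er, ec⟩ := ih (by omega)
    rw [List.range_succ, List.foldl_append, List.foldl_cons, List.foldl_nil]
    have hkn : k < mlst.length := by omega
    obtain ⟨fl, fr, fc⟩ := inner_fold_inv mlst k hkn (mlst.length - (k+1)) (by omega) _ el er ec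
    refine ⟨fl, fr, ?_⟩
    intro i j hi hj
    rw [fc i j hi hj]
    by_cases h : i ≠ j ∧ min i j < k + 1
    · rw [if_pos (by omega), if_pos h]
    · rw [if_neg (by omega), if_neg h]

lemma pair_split (l : List Nat) (f : List (List Int) → Nat → List (List Int))
    (e : Nat → String) (D : List (List Int)) (h : List String) :
    l.foldl (fun st k => (f st.1 k, st.2 ++ [e k])) (D, h) = (l.foldl f D, h ++ l.map e) := by
  induction l generalizing D h with
  | nil => simp
  | cons x xs ih => simp [ih]

lemma map_getD_range {α β : Type} (l : List α) (d : α) (f : α → β) :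
    (List.range l.length).map (fun k => f (l.getD k d)) = l.map f := by
  apply List.ext_getElem
  · simp
  · intro i h1 h2
    simp only [List.getElem_map, List.getElem_range]
    rw [List.getD_eq_getElem _ _ (by simpa using h2)]

def innerPy (mlst : List (List String)) (y : Nat) : List (List Int) → Int → List (List Int) :=
  fun D row2 =>
    let dist := (PySem.List.pyRange 1 ((PySem.List.pyGetD mlst 0 []).length : Int) 1).foldl
      (fun dist col =>
        dist + compareAlleles (PySem.List.pyGetD (PySem.List.pyGetD mlst (y : Int) []) col "")
                              (PySem.List.pyGetD (PySem.List.pyGetD mlst row2 []) col "")) 0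
    let D1 := PySem.List.pySetD D (y : Int)
      (PySem.List.pySetD (PySem.List.pyGetD D (y : Int) []) row2 dist)
    PySem.List.pySetD D1 row2 (PySem.List.pySetD (PySem.List.pyGetD D1 row2 []) (y : Int) dist)

lemma innerPy_eq (mlst : List (List String)) (y j : Nat) (E : List (List Int)) :
    innerPy mlst y E (j : Int) = innerF mlst y E j := by
  unfold innerPy innerF updCell
  rw [dist_eq]
  simp [PySem.List.pySetD_natCast, PySem.List.pyGetD_natCast]

lemma A_unfold (mlst : List (List String)) :
    mlst_distance mlst =
      ((List.range mlst.length).foldl (fun D r =>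
          (List.range (mlst.length - (r+1))).foldl (fun D t => innerF mlst r D (r+1+t)) D)
        ((List.range mlst.length).map (fun _ => List.replicate mlst.length (0 : Int))),
       mlst.map (fun r => PySem.List.pyGetD r 0 "")) := by
  simp only [mlst_distance]
  rw [PySem.List.pyRange_zero_nat, List.map_map, List.foldl_map]
  refine (pair_split (List.range mlst.length)
      (fun D y => (PySem.List.pyRange ((y : Int)+1) ((mlst.length : Int)) 1).foldl
        (innerPy mlst y) D)
      (fun y => PySem.List.pyGetD (PySem.List.pyGetD mlst (y : Int) []) 0 "")
      (List.map ((fun _ => List.replicate mlst.length (0 : Int)) ∘ fun k => ((k : Nat) : Int))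
        (List.range mlst.length))
      []).trans ?_
  congr 1
  · refine (PySem.List.foldl_congr_mem _ _
      (fun D y => (List.range (mlst.length - (y+1))).foldl
        (fun D t => innerF mlst y D (y+1+t)) D) _ ?_).trans ?_
    · intro D y hy
      rw [show ((y : Int)+1) = (((y+1 : Nat)) : Int) from by push_cast; ring,
        PySem.List.pyRange_one,
        show (((mlst.length : Int)) - (((y+1 : Nat)) : Int)).toNat = mlst.length - (y+1)
          from by omega,
        List.foldl_map]
      refine PySem.List.foldl_congr_mem _ _ _ _ ?_
      intro E t ht
      rw [show (((y+1 : Nat)) : Int) + (t : Int) = (((y+1+t : Nat)) : Int) from by push_cast; ring]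
      exact innerPy_eq mlst y (y+1+t) E
    · have einit : (List.map ((fun _ => List.replicate mlst.length (0 : Int)) ∘
          fun k => ((k : Nat) : Int)) (List.range mlst.length))
          = (List.range mlst.length).map (fun _ => List.replicate mlst.length (0 : Int)) := by
        apply List.map_congr_left
        intro k _
        rfl
      rw [einit]
  · rw [List.nil_append]
    simp only [PySem.List.pyGetD_natCast]
    exact map_getD_range mlst [] (fun r => PySem.List.pyGetD r 0 "")

-- ===== B-side model: bucket-based column step =====

def pvVal (mlst : List (List String)) (c i : Nat) : String := (mlst.getD i []).getD c ""

def occN (mlst : List (List String)) (c : Nat) (v : String) : List Nat :=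
  (List.range mlst.length).filter (fun x => pvVal mlst c x == v)

def incr (D : List (List Int)) (x y : Nat) : List (List Int) :=
  updCell D x y (pvCell D x y + 1)

def bump2 (D : List (List Int)) (x y : Nat) : List (List Int) :=
  incr (incr D x y) y x

def bump2I (D : List (List Int)) (i j : Int) : List (List Int) :=
  let D1 := PySem.List.pySetD D i (PySem.List.pySetD (PySem.List.pyGetD D i []) j
    (PySem.List.pyGetD (PySem.List.pyGetD D i []) j 0 + 1))
  PySem.List.pySetD D1 j (PySem.List.pySetD (PySem.List.pyGetD D1 j []) i
    (PySem.List.pyGetD (PySem.List.pyGetD D1 j []) i 0 + 1))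

def colStepN (mlst : List (List String)) (c : Nat) (D : List (List Int)) : List (List Int) :=
  let groups : PySem.Dict String (List Int) := (List.range mlst.length).foldl
    (fun g i => g.modify (pvVal mlst c i) [] (fun xs => xs ++ [(i : Int)])) PySem.Dict.empty
  let members : List (List Int) := (groups.items.filter (fun p => p.1 ≠ "0")).map (fun p => p.2)
  (List.range members.length).foldl (fun D a =>
    (List.range (members.length - (a+1))).foldl (fun D t =>
      ((members.getD a []).foldl (fun D i =>
        ((members.getD (a+1+t) []).foldl (fun D j => bump2I D i j) D)) D)) D) D

lemma bump2I_natCast (D : List (List Int)) (x y : Nat) :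
    bump2I D (x : Int) (y : Int) = bump2 D x y := by
  unfold bump2I bump2 incr updCell pvCell
  simp [PySem.List.pySetD_natCast, PySem.List.pyGetD_natCast]

lemma incr_len (n : Nat) (D : List (List Int)) (hlen : D.length = n)
    (hrows : ∀ r ∈ D, r.length = n) (x y : Nat) (hx : x < n) (hy : y < n) :
    (incr D x y).length = n ∧ ∀ r ∈ incr D x y, r.length = n :=
  updCell_len n D hlen hrows x y hx _

lemma incr_cell (n : Nat) (D : List (List Int)) (hlen : D.length = n)
    (hrows : ∀ r ∈ D, r.length = n) (x y : Nat) (hx : x < n) (hy : y < n) (i j : Nat) :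
    pvCell (incr D x y) i j = pvCell D i j + (if i = x ∧ j = y then 1 else 0) := by
  rw [incr, cell_upd n D hlen hrows x y hx hy _ i j]
  by_cases h : i = x ∧ j = y
  · obtain ⟨rfl, rfl⟩ := h
    rw [if_pos ⟨rfl, rfl⟩, if_pos ⟨rfl, rfl⟩]
  · rw [if_neg h, if_neg h]
    ring

lemma bump2_cell (n : Nat) (D : List (List Int)) (hlen : D.length = n)
    (hrows : ∀ r ∈ D, r.length = n) (x y : Nat) (hx : x < n) (hy : y < n) (i j : Nat) :
    pvCell (bump2 D x y) i j = pvCell D i j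
      + (if i = x ∧ j = y then 1 else 0) + (if i = y ∧ j = x then 1 else 0) := by
  obtain ⟨l1, r1⟩ := incr_len n D hlen hrows x y hx hy
  rw [bump2, incr_cell n _ l1 r1 y x hy hx i j, incr_cell n D hlen hrows x y hx hy i j]

lemma bump2_len (n : Nat) (D : List (List Int)) (hlen : D.length = n)
    (hrows : ∀ r ∈ D, r.length = n) (x y : Nat) (hx : x < n) (hy : y < n) :
    (bump2 D x y).length = n ∧ ∀ r ∈ bump2 D x y, r.length = n := by
  obtain ⟨l1, r1⟩ := incr_len n D hlen hrows x y hx hy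
  exact incr_len n _ l1 r1 y x hy hx

def crossL (xs ys : List Nat) : List (Nat × Nat) :=
  xs.flatMap (fun x => ys.map (fun y => (x, y)))

lemma fold_bump2 (n : Nat) (L : List (Nat × Nat)) (hL : ∀ p ∈ L, p.1 < n ∧ p.2 < n)
    (D : List (List Int)) (hlen : D.length = n) (hrows : ∀ r ∈ D, r.length = n) :
    (L.foldl (fun D p => bump2 D p.1 p.2) D).length = n ∧
    (∀ r ∈ L.foldl (fun D p => bump2 D p.1 p.2) D, r.length = n) ∧
    ∀ i j, pvCell (L.foldl (fun D p => bump2 D p.1 p.2) D) i j =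
      pvCell D i j + (L.countP (fun p => decide (p.1 = i ∧ p.2 = j)) : Int)
        + (L.countP (fun p => decide (p.1 = j ∧ p.2 = i)) : Int) := by
  induction L generalizing D with
  | nil => exact ⟨hlen, hrows, by simp⟩
  | cons p L ih =>
    obtain ⟨hp1, hp2⟩ := hL p (List.mem_cons_self)
    obtain ⟨l1, r1⟩ := bump2_len n D hlen hrows p.1 p.2 hp1 hp2
    obtain ⟨el, er, ec⟩ := ih (fun q hq => hL q (List.mem_cons_of_mem _ hq)) _ l1 r1
    refine ⟨by simpa using el, by simpa using er, ?_⟩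
    intro i j
    simp only [List.foldl_cons]
    rw [ec i j, bump2_cell n D hlen hrows p.1 p.2 hp1 hp2 i j]
    simp only [List.countP_cons, decide_eq_true_eq]
    push_cast
    split_ifs <;> omega

lemma countP_flatMap {α β : Type} (l : List α) (g : α → List β) (p : β → Bool) :
    (l.flatMap g).countP p = (l.map (fun x => (g x).countP p)).sum := by
  induction l with
  | nil => simp
  | cons x xs ih => simp [List.countP_append, ih]

lemma countP_cross (xs ys : List Nat) (i j : Nat) :
    (crossL xs ys).countP (fun p => decide (p.1 = i ∧ p.2 = j)) = xs.count i * ys.count j := by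
  unfold crossL
  induction xs with
  | nil => simp
  | cons x xs ih =>
    simp only [List.flatMap_cons, List.countP_append, ih, List.countP_map]
    by_cases h : x = i
    · subst h
      simp only [List.count_cons_self]
      have : (ys.countP ((fun p => decide (p.1 = x ∧ p.2 = j)) ∘ fun y => (x, y))) = ys.count j := by
        simp only [List.count, Function.comp_def, true_and]
        refine List.countP_congr (fun y _ => ?_)
        simp
      rw [this]
      ring
    · rw [List.count_cons_of_ne (by exact fun e => h (by simpa using e))]
      have : (ys.countP ((fun p => decide (p.1 = i ∧ p.2 = j)) ∘ fun y => (x, y))) = 0 := by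
        simp [Function.comp_def, h]
      rw [this]
      ring

lemma occN_count (mlst : List (List String)) (c : Nat) (v : String) (i : Nat) :
    (occN mlst c v).count i = if pvVal mlst c i = v ∧ i < mlst.length then 1 else 0 := by
  unfold occN
  by_cases h : pvVal mlst c i = v
  · rw [List.count_filter (by simpa using h), List.count_range]
    simp [h]
  · have : i ∉ (List.range mlst.length).filter (fun x => pvVal mlst c x == v) := by
      intro hmem
      exact h (by simpa using (List.mem_filter.mp hmem).2)
    rw [List.count_eq_zero.mpr this, if_neg (fun hh => h hh.1)]

lemma sum_range_point {m A : Nat} (f : Nat → Nat) (hA : A < m)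
    (h0 : ∀ a, a < m → a ≠ A → f a = 0) :
    ((List.range m).map f).sum = f A := by
  induction m with
  | zero => omega
  | succ m ih =>
    rw [List.range_succ, List.map_append, List.sum_append]
    simp only [List.map_cons, List.map_nil, List.sum_cons, List.sum_nil, Nat.add_zero]
    by_cases h : A = m
    · subst h
      have hz : ∀ a ∈ List.range A, f a = 0 := fun a ha =>
        h0 a (by simp at ha; omega) (by simp at ha; omega)
      rw [List.sum_eq_zero (by
        intro x hx
        obtain ⟨a, ha, rfl⟩ := List.mem_map.mp hx
        exact hz a ha)]
      omega
    · rw [ih (by omega) (fun a ha hne => h0 a (by omega) hne), h0 m (by omega) (fun e => h e.symm)]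
      omega

lemma sum_range_hit (k x B : Nat) :
    ((List.range k).map (fun t => if x + t = B then 1 else 0)).sum
      = if x ≤ B ∧ B < x + k then 1 else 0 := by
  induction k with
  | zero => simp
  | succ k ih =>
    rw [List.range_succ, List.map_append, List.sum_append, ih]
    simp only [List.map_cons, List.map_nil, List.sum_cons, List.sum_nil]
    split_ifs <;> omega

-- the double range sum over ordered bucket pairs
lemma cross_sum (ks : List String) (hnd : ks.Nodup) (u v : String) :
    ((List.range ks.length).map (fun a =>
      ((List.range (ks.length - (a+1))).map (fun t =>
        (if ks.getD a "" = u then 1 else 0) * (if ks.getD (a+1+t) "" = v then 1 else 0))).sum)).sum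
    = if u ∈ ks ∧ v ∈ ks ∧ ks.idxOf u < ks.idxOf v then 1 else 0 := by
  by_cases hu : u ∈ ks
  · have hA : ks.idxOf u < ks.length := List.idxOf_lt_length_iff.mpr hu
    have key : ∀ a, a < ks.length → (ks.getD a "" = u ↔ a = ks.idxOf u) := by
      intro a ha
      rw [List.getD_eq_getElem _ _ ha]
      constructor
      · intro h
        exact hnd.getElem_inj_iff.mp (h.trans (List.getElem_idxOf hA).symm)
      · rintro rfl
        exact List.getElem_idxOf hA
    have h0 : ∀ a, a < ks.length → a ≠ ks.idxOf u →
        ((List.range (ks.length - (a+1))).map (fun t =>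
          (if ks.getD a "" = u then 1 else 0) * (if ks.getD (a+1+t) "" = v then 1 else 0))).sum = 0 := by
      intro a ha hne
      apply List.sum_eq_zero
      intro x hx
      obtain ⟨t, _, rfl⟩ := List.mem_map.mp hx
      rw [if_neg (fun h => hne ((key a ha).mp h)), Nat.zero_mul]
    rw [sum_range_point (f := fun a =>
        ((List.range (ks.length - (a+1))).map (fun t =>
          (if ks.getD a "" = u then 1 else 0) * (if ks.getD (a+1+t) "" = v then 1 else 0))).sum)
        hA h0]
    rw [if_pos ((key _ hA).mpr rfl)]
    simp only [Nat.one_mul]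
    by_cases hv : v ∈ ks
    · have hB : ks.idxOf v < ks.length := List.idxOf_lt_length_iff.mpr hv
      have key2 : ∀ a, a < ks.length → (ks.getD a "" = v ↔ a = ks.idxOf v) := by
        intro a ha
        rw [List.getD_eq_getElem _ _ ha]
        constructor
        · intro h
          exact hnd.getElem_inj_iff.mp (h.trans (List.getElem_idxOf hB).symm)
        · rintro rfl
          exact List.getElem_idxOf hB
      have econg : (List.range (ks.length - (ks.idxOf u + 1))).map (fun t =>
            if ks.getD (ks.idxOf u + 1 + t) "" = v then 1 else 0)
          = (List.range (ks.length - (ks.idxOf u + 1))).map (fun t =>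
            if (ks.idxOf u + 1) + t = ks.idxOf v then 1 else 0) := by
        apply List.map_congr_left
        intro t ht
        have ht' : t < ks.length - (ks.idxOf u + 1) := List.mem_range.mp ht
        by_cases hc : ks.getD (ks.idxOf u + 1 + t) "" = v
        · rw [if_pos hc, if_pos ((key2 _ (by omega)).mp hc)]
        · rw [if_neg hc, if_neg (fun h => hc ((key2 _ (by omega)).mpr h))]
      rw [econg, sum_range_hit]
      by_cases hlt : ks.idxOf u < ks.idxOf v
      · rw [if_pos (by omega), if_pos ⟨hu, hv, hlt⟩]
      · rw [if_neg (by omega), if_neg (fun h => hlt h.2.2)]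
    · rw [if_neg (fun h => hv h.2.1)]
      apply List.sum_eq_zero
      intro x hx
      obtain ⟨t, ht, rfl⟩ := List.mem_map.mp hx
      have ht' : t < ks.length - (ks.idxOf u + 1) := List.mem_range.mp ht
      rw [if_neg (fun h => hv (by
        rw [← h, List.getD_eq_getElem _ _ (by omega)]
        exact List.getElem_mem _))]
  · rw [if_neg (fun h => hu h.1)]
    apply List.sum_eq_zero
    intro x hx
    obtain ⟨a, ha, rfl⟩ := List.mem_map.mp hx
    apply List.sum_eq_zero
    intro y hy
    obtain ⟨t, _, rfl⟩ := List.mem_map.mp hy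
    have ha' : a < ks.length := List.mem_range.mp ha
    rw [if_neg (fun h => hu (by rw [← h, List.getD_eq_getElem _ _ ha']; exact List.getElem_mem _)),
      Nat.zero_mul]

lemma cross_fold_eq (xs ys : List Nat) (D : List (List Int)) :
    (xs.map (fun x : Nat => (x : Int))).foldl (fun D i =>
      ((ys.map (fun y : Nat => (y : Int))).foldl (fun D j => bump2I D i j) D)) D
    = (crossL xs ys).foldl (fun D p => bump2 D p.1 p.2) D := by
  induction xs generalizing D with
  | nil => rfl
  | cons x xs ih =>
    have hc : crossL (x :: xs) ys = ys.map (fun y => (x, y)) ++ crossL xs ys := rfl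
    rw [hc, List.foldl_append, List.map_cons, List.foldl_cons, ← ih]
    congr 1
    rw [List.foldl_map, List.foldl_map]
    exact PySem.List.foldl_congr_mem _ _ _ _ (fun E y _ => bump2I_natCast E x y)

lemma members_fold (mlst : List (List String)) (c : Nat) (ks : List String)
    (members : List (List Int)) (hml : members.length = ks.length)
    (hmem : ∀ a, a < ks.length → members.getD a [] =
      (occN mlst c (ks.getD a "")).map (fun x : Nat => (x : Int)))
    (hnd : ks.Nodup)
    (hks : ∀ u, u ∈ ks ↔ (u ∈ (List.range mlst.length).map (pvVal mlst c) ∧ u ≠ "0"))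
    (D : List (List Int)) (hlen : D.length = mlst.length)
    (hrows : ∀ r ∈ D, r.length = mlst.length) :
    ((List.range members.length).foldl (fun D a =>
      (List.range (members.length - (a+1))).foldl (fun D t =>
        ((members.getD a []).foldl (fun D i =>
          ((members.getD (a+1+t) []).foldl (fun D j => bump2I D i j) D)) D)) D) D).length = mlst.length ∧
    (∀ r ∈ (List.range members.length).foldl (fun D a =>
      (List.range (members.length - (a+1))).foldl (fun D t =>
        ((members.getD a []).foldl (fun D i =>
          ((members.getD (a+1+t) []).foldl (fun D j => bump2I D i j) D)) D)) D) D, r.length = mlst.length) ∧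
    ∀ i j, i < mlst.length → j < mlst.length →
      pvCell ((List.range members.length).foldl (fun D a =>
      (List.range (members.length - (a+1))).foldl (fun D t =>
        ((members.getD a []).foldl (fun D i =>
          ((members.getD (a+1+t) []).foldl (fun D j => bump2I D i j) D)) D)) D) D) i j =
        pvCell D i j + compareAlleles (pvVal mlst c i) (pvVal mlst c j) := by
  set n := mlst.length with hn
  set gN : Nat → List Nat := fun a => occN mlst c (ks.getD a "") with hgN
  set LL : List (Nat × Nat) := (List.range ks.length).flatMap (fun a =>
    (List.range (ks.length - (a+1))).flatMap (fun t => crossL (gN a) (gN (a+1+t)))) with hLL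
  have hbig : (List.range members.length).foldl (fun D a =>
      (List.range (members.length - (a+1))).foldl (fun D t =>
        ((members.getD a []).foldl (fun D i =>
          ((members.getD (a+1+t) []).foldl (fun D j => bump2I D i j) D)) D)) D) D
      = LL.foldl (fun D p => bump2 D p.1 p.2) D := by
    rw [hLL, List.foldl_flatMap, hml]
    refine PySem.List.foldl_congr_mem _ _ _ _ ?_
    intro E a ha
    rw [List.foldl_flatMap]
    refine PySem.List.foldl_congr_mem _ _ _ _ ?_
    intro E' t ht
    have ha' : a < ks.length := List.mem_range.mp ha
    have ht' : t < ks.length - (a+1) := List.mem_range.mp ht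
    rw [hmem a ha', hmem (a+1+t) (by omega)]
    exact cross_fold_eq _ _ E'
  have hLLmem : ∀ p ∈ LL, p.1 < n ∧ p.2 < n := by
    intro p hp
    rw [hLL] at hp
    obtain ⟨a, _, hp1⟩ := List.mem_flatMap.mp hp
    obtain ⟨t, _, hp2⟩ := List.mem_flatMap.mp hp1
    obtain ⟨x, hx, hp3⟩ := List.mem_flatMap.mp hp2
    obtain ⟨y, hy, rfl⟩ := List.mem_map.mp hp3
    have hx' : x ∈ List.range n := List.mem_of_mem_filter hx
    have hy' : y ∈ List.range n := List.mem_of_mem_filter hy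
    exact ⟨List.mem_range.mp hx', List.mem_range.mp hy'⟩
  obtain ⟨el, er, ec⟩ := fold_bump2 n LL hLLmem D hlen hrows
  rw [hbig]
  refine ⟨el, er, ?_⟩
  intro i j hi hj
  rw [ec i j]
  -- counts
  have hcount : ∀ (i' j' : Nat), i' < n → j' < n →
      LL.countP (fun p => decide (p.1 = i' ∧ p.2 = j')) =
      if pvVal mlst c i' ∈ ks ∧ pvVal mlst c j' ∈ ks ∧
          ks.idxOf (pvVal mlst c i') < ks.idxOf (pvVal mlst c j') then 1 else 0 := by
    intro i' j' hi' hj'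
    rw [hLL, countP_flatMap]
    rw [← cross_sum ks hnd (pvVal mlst c i') (pvVal mlst c j')]
    apply congrArg
    apply List.map_congr_left
    intro a ha
    have ha' : a < ks.length := List.mem_range.mp ha
    rw [countP_flatMap]
    apply congrArg
    apply List.map_congr_left
    intro t ht
    have ht' : t < ks.length - (a+1) := List.mem_range.mp ht
    rw [countP_cross, hgN]
    simp only []
    rw [occN_count, occN_count]
    have e1 : (if pvVal mlst c i' = ks.getD a "" ∧ i' < mlst.length then 1 else 0) =
        (if ks.getD a "" = pvVal mlst c i' then 1 else 0) := by
      by_cases h : ks.getD a "" = pvVal mlst c i'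
      · rw [if_pos h, if_pos ⟨h.symm, hi'⟩]
      · rw [if_neg h, if_neg (fun hh => h hh.1.symm)]
    have e2 : (if pvVal mlst c j' = ks.getD (a+1+t) "" ∧ j' < mlst.length then 1 else 0) =
        (if ks.getD (a+1+t) "" = pvVal mlst c j' then 1 else 0) := by
      by_cases h : ks.getD (a+1+t) "" = pvVal mlst c j'
      · rw [if_pos h, if_pos ⟨h.symm, hj'⟩]
      · rw [if_neg h, if_neg (fun hh => h hh.1.symm)]
    rw [e1, e2]
  rw [hcount i j hi hj, hcount j i hj hi]
  set u := pvVal mlst c i with hu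
  set v := pvVal mlst c j with hv
  have humem : u ∈ ks ↔ u ≠ "0" := by
    rw [hks u]
    have : u ∈ (List.range n).map (pvVal mlst c) :=
      List.mem_map.mpr ⟨i, List.mem_range.mpr hi, rfl⟩
    tauto
  have hvmem : v ∈ ks ↔ v ≠ "0" := by
    rw [hks v]
    have : v ∈ (List.range n).map (pvVal mlst c) :=
      List.mem_map.mpr ⟨j, List.mem_range.mpr hj, rfl⟩
    tauto
  rw [compareAlleles_eq]
  by_cases huv : u = v
  · rw [if_neg (fun h => by rw [huv] at h; exact lt_irrefl _ h.2.2),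
        if_neg (fun h => by rw [huv] at h; exact lt_irrefl _ h.2.2),
        if_neg (fun h => h.1 huv)]
    simp
  · by_cases hu0 : u = "0"
    · rw [if_neg (fun h => (humem.mp h.1) hu0), if_neg (fun h => (humem.mp h.2.1) hu0),
        if_neg (fun h => h.2.1 hu0)]
      simp
    · by_cases hv0 : v = "0"
      · rw [if_neg (fun h => (hvmem.mp h.2.1) hv0), if_neg (fun h => (hvmem.mp h.1) hv0),
          if_neg (fun h => h.2.2 hv0)]
        simp
      · have hA : u ∈ ks := humem.mpr hu0
        have hB : v ∈ ks := hvmem.mpr hv0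
        have hA' : ks.idxOf u < ks.length := List.idxOf_lt_length_iff.mpr hA
        have hB' : ks.idxOf v < ks.length := List.idxOf_lt_length_iff.mpr hB
        have hAB : ks.idxOf u ≠ ks.idxOf v := by
          intro e
          apply huv
          rw [← List.getElem_idxOf hA', ← List.getElem_idxOf hB']
          exact getElem_congr rfl e hA'
        by_cases hlt : ks.idxOf u < ks.idxOf v
        · rw [if_pos ⟨hA, hB, hlt⟩, if_neg (fun h => absurd h.2.2 (by omega)),
            if_pos ⟨huv, hu0, hv0⟩]
          simp
        · rw [if_neg (fun h => hlt h.2.2), if_pos ⟨hB, hA, by omega⟩,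
            if_pos ⟨huv, hu0, hv0⟩]
          simp

lemma colStepN_cell (mlst : List (List String)) (c : Nat) (D : List (List Int))
    (hlen : D.length = mlst.length) (hrows : ∀ r ∈ D, r.length = mlst.length) :
    (colStepN mlst c D).length = mlst.length ∧
    (∀ r ∈ colStepN mlst c D, r.length = mlst.length) ∧
    ∀ i j, i < mlst.length → j < mlst.length →
      pvCell (colStepN mlst c D) i j = pvCell D i j + compareAlleles (pvVal mlst c i) (pvVal mlst c j) := by
  set n := mlst.length with hn
  set groups : PySem.Dict String (List Int) := (List.range n).foldl
    (fun g i => g.modify (pvVal mlst c i) [] (fun xs => xs ++ [(i : Int)])) PySem.Dict.empty with hg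
  -- groups as a fold over key/value pairs
  have hg' : groups = ((List.range n).map (fun i => (pvVal mlst c i, (i : Int)))).foldl
      (fun d p => d.modify p.1 [] (fun xs => xs ++ [p.2])) PySem.Dict.empty := by
    rw [List.foldl_map]
  have G1 : ∀ v, groups.getD v [] = (occN mlst c v).map (fun x : Nat => (x : Int)) := by
    intro v
    rw [hg', PySem.Dict.getD_foldl_modify_append]
    rw [List.filter_map, List.map_map]
    simp [PySem.Dict.getD_empty, occN, Function.comp_def, ← hn, List.map_eq_flatMap]
  have G2 : groups.keys.Nodup := by
    rw [hg]
    exact PySem.Dict.nodup_keys_foldl_modify_key _ (pvVal mlst c) []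
      (fun _ i => (fun xs => xs ++ [(i : Int)])) _ PySem.Dict.nodup_keys_empty
  have G3 : ∀ u, u ∈ groups.keys ↔ u ∈ (List.range n).map (pvVal mlst c) := by
    intro u
    rw [hg, PySem.Dict.keys_foldl_modify_key _ (pvVal mlst c) []
      (fun _ i => (fun xs => xs ++ [(i : Int)])) _]
    exact PySem.Set.mem_ofList _ u
  set F := groups.items.filter (fun p => p.1 ≠ "0") with hF
  set ks := F.map (fun p => p.1) with hks
  set members := F.map (fun p => p.2) with hmem
  have hkeys : groups.keys = groups.items.map (fun p => p.1) := by
    simp only [PySem.Dict.keys]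
  have F1 : ks.Nodup := by
    rw [hks]
    exact (List.Sublist.map (fun (p : String × List Int) => p.1)
      (List.filter_sublist (l := groups.items))).nodup (hkeys ▸ G2)
  have hlenks : ks.length = F.length := by simp [hks]
  have hlenmem : members.length = F.length := by simp [hmem]
  have F2 : ∀ a, a < F.length → members.getD a [] =
      (occN mlst c (ks.getD a "")).map (fun x : Nat => (x : Int)) := by
    intro a ha
    have hFa : F.getD a ("", []) ∈ F := by
      rw [List.getD_eq_getElem _ _ ha]; exact List.getElem_mem _
    have hitems : F.getD a ("", []) ∈ groups.items := List.mem_of_mem_filter hFa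
    have := PySem.Dict.getD_of_mem_items groups
      (k := (F.getD a ("", [])).1) (v := (F.getD a ("", [])).2)
      (by simpa using hitems) G2 []
    have e1 : members.getD a [] = (F.getD a ("", [])).2 := by
      rw [hmem, List.getD_eq_getElem _ _ (by simpa using ha), List.getElem_map,
        List.getD_eq_getElem _ _ ha]
    have e2 : ks.getD a "" = (F.getD a ("", [])).1 := by
      rw [hks, List.getD_eq_getElem _ _ (by simpa using ha), List.getElem_map,
        List.getD_eq_getElem _ _ ha]
    rw [e1, e2, ← G1, this]
  have F3 : ∀ u, u ∈ ks ↔ (u ∈ (List.range n).map (pvVal mlst c) ∧ u ≠ "0") := by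
    intro u
    constructor
    · intro hu
      obtain ⟨p, hp, rfl⟩ := List.mem_map.mp hu
      have h1 := List.mem_of_mem_filter hp
      have h2 := List.of_mem_filter hp
      exact ⟨(G3 p.1).mp (by rw [hkeys]; exact List.mem_map_of_mem h1), by simpa using h2⟩
    · rintro ⟨hu, hu0⟩
      have : u ∈ groups.keys := (G3 u).mpr hu
      rw [hkeys] at this
      obtain ⟨p, hp, rfl⟩ := List.mem_map.mp this
      exact List.mem_map_of_mem (List.mem_filter.mpr ⟨hp, by simpa using hu0⟩)
  have main := members_fold mlst c ks members (by rw [hlenmem, hlenks])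
    (fun a ha => F2 a (by omega)) F1 F3 D hlen hrows
  simp only [colStepN]
  exact main

lemma col_fold (mlst : List (List String)) (L : List Nat) (D : List (List Int))
    (hlen : D.length = mlst.length) (hrows : ∀ r ∈ D, r.length = mlst.length) :
    (L.foldl (fun D c => colStepN mlst c D) D).length = mlst.length ∧
    (∀ r ∈ L.foldl (fun D c => colStepN mlst c D) D, r.length = mlst.length) ∧
    ∀ i j, i < mlst.length → j < mlst.length →
      pvCell (L.foldl (fun D c => colStepN mlst c D) D) i j =
        pvCell D i j + (L.map (fun c => compareAlleles (pvVal mlst c i) (pvVal mlst c j))).sum := by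
  induction L generalizing D with
  | nil => exact ⟨hlen, hrows, by simp⟩
  | cons c0 L ih =>
    obtain ⟨l1, r1, c1⟩ := colStepN_cell mlst c0 D hlen hrows
    obtain ⟨el, er, ec⟩ := ih _ l1 r1
    refine ⟨by simpa using el, by simpa using er, ?_⟩
    intro i j hi hj
    simp only [List.foldl_cons]
    rw [ec i j hi hj, c1 i j hi hj]
    simp only [List.map_cons, List.sum_cons]
    ring

def colPy (mlst : List (List String)) : List (List Int) → Int → List (List Int) :=
  fun D col =>
    let groups : PySem.Dict String (List Int) := (PySem.List.pyRange 0 (mlst.length : Int) 1).foldl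
      (fun g i => g.modify (PySem.List.pyGetD (PySem.List.pyGetD mlst i []) col "") []
        (fun xs => xs ++ [i])) PySem.Dict.empty
    let members : List (List Int) := (groups.items.filter (fun p => p.1 ≠ "0")).map (fun p => p.2)
    (PySem.List.pyRange 0 (members.length : Int) 1).foldl (fun D a =>
      (PySem.List.pyRange (a + 1) (members.length : Int) 1).foldl (fun D b =>
        (PySem.List.pyGetD members a []).foldl (fun D i =>
          (PySem.List.pyGetD members b []).foldl (fun D j => bump2I D i j) D) D) D) D

lemma outer_eq (M : List (List Int)) (E : List (List Int)) :
    (PySem.List.pyRange 0 (M.length : Int) 1).foldl (fun D a =>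
      (PySem.List.pyRange (a + 1) (M.length : Int) 1).foldl (fun D b =>
        (PySem.List.pyGetD M a []).foldl (fun D i =>
          (PySem.List.pyGetD M b []).foldl (fun D j => bump2I D i j) D) D) D) E
    = (List.range M.length).foldl (fun D a =>
        (List.range (M.length - (a+1))).foldl (fun D t =>
          ((M.getD a []).foldl (fun D i =>
            ((M.getD (a+1+t) []).foldl (fun D j => bump2I D i j) D)) D)) D) E := by
  rw [PySem.List.pyRange_zero_nat, List.foldl_map]
  refine PySem.List.foldl_congr_mem _ _ _ _ ?_
  intro E' a ha
  rw [show ((a : Nat) : Int) + 1 = (((a+1 : Nat)) : Int) from by push_cast; ring,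
    PySem.List.pyRange_one,
    show (((M.length : Int)) - (((a+1 : Nat)) : Int)).toNat = M.length - (a+1) from by omega,
    List.foldl_map]
  refine PySem.List.foldl_congr_mem _ _ _ _ ?_
  intro E'' t ht
  rw [show (((a+1 : Nat)) : Int) + (t : Int) = (((a+1+t : Nat)) : Int) from by push_cast; ring]
  rw [PySem.List.pyGetD_natCast, PySem.List.pyGetD_natCast]

lemma colPy_eq (mlst : List (List String)) (c : Nat) (E : List (List Int)) :
    colPy mlst E ((c : Nat) : Int) = colStepN mlst c E := by
  unfold colPy colStepN
  have hg : (PySem.List.pyRange 0 (mlst.length : Int) 1).foldl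
      (fun g i => g.modify (PySem.List.pyGetD (PySem.List.pyGetD mlst i []) ((c : Nat) : Int) "") []
        (fun xs => xs ++ [i])) (PySem.Dict.empty : PySem.Dict String (List Int))
      = (List.range mlst.length).foldl
        (fun g i => g.modify (pvVal mlst c i) [] (fun xs => xs ++ [(i : Int)])) PySem.Dict.empty := by
    rw [PySem.List.pyRange_zero_nat, List.foldl_map]
    refine PySem.List.foldl_congr_mem _ _ _ _ ?_
    intro g i hi
    rw [PySem.List.pyGetD_natCast, PySem.List.pyGetD_natCast]
    rfl
  rw [hg]
  exact outer_eq _ E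

lemma B_unfold (mlst : List (List String)) :
    mlst_distance_alt mlst =
      ((List.range ((mlst.getD 0 []).length - 1)).foldl (fun D t => colStepN mlst (1+t) D)
        ((List.range mlst.length).map (fun _ => List.replicate mlst.length (0 : Int))),
       mlst.map (fun row => PySem.List.pyGetD row 0 "")) := by
  have e0 : mlst_distance_alt mlst =
      ((PySem.List.pyRange 1 ((PySem.List.pyGetD mlst 0 []).length : Int) 1).foldl (colPy mlst)
        ((PySem.List.pyRange 0 (mlst.length : Int) 1).map
          (fun _ => List.replicate mlst.length (0 : Int))),
       mlst.map (fun row => PySem.List.pyGetD row 0 "")) := rfl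
  rw [e0]
  have harg : ((((mlst.getD 0 []).length : Int)) - 1).toNat = (mlst.getD 0 []).length - 1 := by
    omega
  have einit : (PySem.List.pyRange 0 (mlst.length : Int) 1).map
      (fun _ => List.replicate mlst.length (0 : Int))
      = (List.range mlst.length).map (fun _ => List.replicate mlst.length (0 : Int)) := by
    rw [PySem.List.pyRange_zero_nat, List.map_map]
    exact List.map_congr_left (fun k _ => rfl)
  congr 1
  rw [PySem.List.pyGetD_zero, einit, PySem.List.pyRange_one, harg, List.foldl_map]
  refine PySem.List.foldl_congr_mem _ _ _ _ ?_
  intro E t ht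
  rw [show (1 : Int) + (t : Int) = (((1+t : Nat)) : Int) from by push_cast; ring]
  exact colPy_eq mlst (1+t) E

lemma sum_cols_eq_pvDist (mlst : List (List String)) (i j : Nat) :
    (((List.range ((mlst.getD 0 []).length - 1)).map (fun t => 1+t)).map
      (fun c => compareAlleles (pvVal mlst c i) (pvVal mlst c j))).sum = pvDist mlst i j := by
  rw [List.map_map]
  rfl

-- ===== VERDICT (by name: the statement is the Claim_ definition above) =====
theorem mlst_distance_spec : Claim_equal_mlst_distance := by
  intro mlst _ hpre
  unfold Spec_mlst_distance
  rw [A_unfold, B_unfold]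
  have hD0len : ((List.range mlst.length).map
      (fun _ => List.replicate mlst.length (0:Int))).length = mlst.length := by simp
  have hD0rows : ∀ r ∈ (List.range mlst.length).map
      (fun _ => List.replicate mlst.length (0:Int)), r.length = mlst.length := by
    intro r hr
    obtain ⟨_, _, rfl⟩ := List.mem_map.mp hr
    simp
  have hD0cell : ∀ i j, i < mlst.length → j < mlst.length →
      pvCell ((List.range mlst.length).map (fun _ => List.replicate mlst.length (0:Int))) i j
        = 0 := by
    intro i j hi hj
    have e : ((List.range mlst.length).map (fun _ => List.replicate mlst.length (0 : Int))).getD i []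
        = List.replicate mlst.length (0 : Int) := by
      rw [List.getD_eq_getElem?_getD, List.getElem?_eq_getElem (by simpa using hi)]
      simp
    rw [pvCell, e, List.getD_eq_getElem?_getD, List.getElem?_eq_getElem (by simpa using hj)]
    simp
  have hBfold : (List.range ((mlst.getD 0 []).length - 1)).foldl
      (fun D t => colStepN mlst (1+t) D)
      ((List.range mlst.length).map (fun _ => List.replicate mlst.length (0:Int)))
      = ((List.range ((mlst.getD 0 []).length - 1)).map (fun t => 1+t)).foldl
        (fun D c => colStepN mlst c D)
        ((List.range mlst.length).map (fun _ => List.replicate mlst.length (0:Int))) := by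
    rw [List.foldl_map]
  obtain ⟨bl, br, bc⟩ := col_fold mlst
    ((List.range ((mlst.getD 0 []).length - 1)).map (fun t => 1+t)) _ hD0len hD0rows
  obtain ⟨dl, dr, dc⟩ := outer_fold_inv mlst mlst.length le_rfl
  refine Prod.ext ?_ rfl
  simp only []
  rw [hBfold]
  apply List.ext_getElem
  · rw [dl, bl]
  · intro i h1 h2
    apply List.ext_getElem
    · rw [dr _ (List.getElem_mem _), br _ (List.getElem_mem _)]
    · intro j g1 g2
      have hi : i < mlst.length := by rw [dl] at h1; exact h1
      have hj : j < mlst.length := by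
        rw [dr _ (List.getElem_mem _)] at g1; exact g1
      have eA : (((List.range mlst.length).foldl (fun D r =>
          (List.range (mlst.length - (r+1))).foldl (fun D t => innerF mlst r D (r+1+t)) D)
        ((List.range mlst.length).map (fun _ => List.replicate mlst.length (0 : Int))))[i][j]'g1)
          = pvDist mlst i j := by
        have := dc i j hi hj
        rw [pvCell, List.getD_eq_getElem _ _ h1, List.getD_eq_getElem _ _ g1] at this
        rw [this]
        by_cases hij : i = j
        · subst hij
          rw [if_neg (by omega), pvDist_self]
        · rw [if_pos ⟨hij, by omega⟩]
      have eB := bc i j hi hj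
      rw [hD0cell i j hi hj, sum_cols_eq_pvDist mlst i j, zero_add] at eB
      rw [pvCell, List.getD_eq_getElem _ _ h2, List.getD_eq_getElem _ _ g2] at eB
      rw [eA]
      exact eB.symm
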